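-- pv_equiv track=rewrite | github.com/karthikrajkumar/roleplay_framework | duplicate_detection_algorithm.py | _normalize_name_component
-- ===== SOURCE A (Python) =====
-- import unicodedata
--
-- def _normalize_name_component(name: str) -> str:
--     """
--     Normalize name component with Unicode handling and common variations
--     """
--     # Remove diacritics and convert to ASCII
--     name = unicodedata.normalize('NFD', name)
--     name = ''.join(char for char in name if unicodedata.category(char) != 'Mn')
--
--     # Handle common name variations
--     name_variations = {
--         'michael': ['mike', 'mick'],
--         'william': ['bill', 'will'],
--         'robert': ['bob', 'rob'],
--         'elizabeth': ['liz', 'beth', 'betty'],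
--         'richard': ['rick', 'dick'],
--         'christopher': ['chris'],
--         'matthew': ['matt'],
--         'anthony': ['tony'],
--         'jennifer': ['jen', 'jenny']
--     }
--
--     # Check if name matches any variations
--     for canonical, variations in name_variations.items():
--         if name in variations:
--             return canonical
--         elif name == canonical:
--             return canonical
--
--     return name
-- ===== SOURCE B (Python) =====
-- import unicodedata
--
-- # Flat (alias, canonical) index, sorted by alias for binary search.
-- _SORTED_ALIASES = (
--     ('anthony', 'anthony'), ('beth', 'elizabeth'), ('betty', 'elizabeth'),
--     ('bill', 'william'), ('bob', 'robert'), ('chris', 'christopher'),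
--     ('christopher', 'christopher'), ('dick', 'richard'),
--     ('elizabeth', 'elizabeth'), ('jen', 'jennifer'),
--     ('jennifer', 'jennifer'), ('jenny', 'jennifer'), ('liz', 'elizabeth'),
--     ('matt', 'matthew'), ('matthew', 'matthew'), ('michael', 'michael'),
--     ('mick', 'michael'), ('mike', 'michael'), ('richard', 'richard'),
--     ('rick', 'richard'), ('rob', 'robert'), ('robert', 'robert'),
--     ('tony', 'anthony'), ('will', 'william'), ('william', 'william'),
-- )
--
-- def _normalize_name_component(name: str) -> str:
--     name = unicodedata.normalize('NFD', name)
--     name = ''.join(char for char in name if unicodedata.category(char) != 'Mn')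
--     # Binary search over the sorted flat alias index.
--     lo, hi = 0, len(_SORTED_ALIASES)
--     while lo < hi:
--         mid = (lo + hi) // 2
--         key, canonical = _SORTED_ALIASES[mid]
--         if key == name:
--             return canonical
--         if key < name:
--             lo = mid + 1
--         else:
--             hi = mid
--     return name
-- ===== Notes on version B (the rewrite author's own statement) =====
-- stated objective: alternative
-- what changed: Replaced A's linear scan over the nested canonical->variations table (membership test per entry) by a hand-written binary search over a flat (alias, canonical) index pre-sorted by alias; correct because every alias/canonical key is distinct, so first-match order in A cannot matter.
import Mathlib
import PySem

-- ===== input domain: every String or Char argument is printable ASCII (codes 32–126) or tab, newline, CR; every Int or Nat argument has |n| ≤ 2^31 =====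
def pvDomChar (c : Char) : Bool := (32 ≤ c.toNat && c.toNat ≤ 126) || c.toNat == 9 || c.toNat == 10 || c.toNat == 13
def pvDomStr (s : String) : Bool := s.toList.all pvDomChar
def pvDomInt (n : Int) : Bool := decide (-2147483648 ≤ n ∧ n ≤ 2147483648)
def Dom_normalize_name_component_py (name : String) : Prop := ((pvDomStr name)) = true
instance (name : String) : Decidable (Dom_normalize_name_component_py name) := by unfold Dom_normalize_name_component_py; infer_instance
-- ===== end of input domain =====

-- B replaces A's linear scan of the nested variations table by a binary search
-- over a flat (alias, canonical) index pre-sorted by alias; objective: alternative algorithm.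
-- Unicode note: on the printable-ASCII domain Dom, NFD normalization is the identity and no
-- character has category 'Mn', so the normalization+strip step is ported as the identity (exact on Dom).

-- ===== PORT A =====
-- exact on Dom: NFD is identity on ASCII and no ASCII char has Unicode category Mn
def pvNfdStripMn (s : String) : String := s

def pvNameVariations : List (String × List String) :=
  [("michael", ["mike", "mick"]),
   ("william", ["bill", "will"]),
   ("robert", ["bob", "rob"]),
   ("elizabeth", ["liz", "beth", "betty"]),
   ("richard", ["rick", "dick"]),
   ("christopher", ["chris"]),
   ("matthew", ["matt"]),
   ("anthony", ["tony"]),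
   ("jennifer", ["jen", "jenny"])]

-- the for-loop over name_variations.items() with its two early returns
def pvScanA (name : String) : List (String × List String) → String
  | [] => name
  | (canonical, variations) :: rest =>
    if variations.contains name then canonical
    else if name == canonical then canonical
    else pvScanA name rest

def normalize_name_component_py (name : String) : String :=
  let name := pvNfdStripMn name
  pvScanA name pvNameVariations

-- ===== PORT B =====
-- flat (alias, canonical) index sorted by alias, as in Source B
def pvSortedAliases : List (String × String) :=
  [("anthony", "anthony"), ("beth", "elizabeth"), ("betty", "elizabeth"),
   ("bill", "william"), ("bob", "robert"), ("chris", "christopher"),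
   ("christopher", "christopher"), ("dick", "richard"),
   ("elizabeth", "elizabeth"), ("jen", "jennifer"),
   ("jennifer", "jennifer"), ("jenny", "jennifer"), ("liz", "elizabeth"),
   ("matt", "matthew"), ("matthew", "matthew"), ("michael", "michael"),
   ("mick", "michael"), ("mike", "michael"), ("richard", "richard"),
   ("rick", "richard"), ("rob", "robert"), ("robert", "robert"),
   ("tony", "anthony"), ("will", "william"), ("william", "william")]

-- Python's '<' on str: lexicographic by code point (hand port, exact for all code points;
-- PySem has no string-order primitive)
def pvStrLtChars : List Char → List Char → Bool
  | _, [] => false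
  | [], _ :: _ => true
  | a :: as, b :: bs => if a < b then true else if b < a then false else pvStrLtChars as bs

def pvStrLt (a b : String) : Bool := pvStrLtChars a.toList b.toList

-- the while-loop of Source B's binary search; fuel only makes the loop total,
-- 32 > any possible number of iterations on a 25-entry index
def pvBisect (name : String) : Nat → Nat → Nat → Option String
  | 0, _, _ => none
  | fuel + 1, lo, hi =>
    if lo < hi then
      let mid := (lo + hi) / 2
      let kv := pvSortedAliases.getD mid ("", "")
      if kv.1 == name then some kv.2
      else if pvStrLt kv.1 name then pvBisect name fuel (mid + 1) hi
      else pvBisect name fuel lo mid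
    else none

def normalize_name_component_py_alt (name : String) : String :=
  let name := pvNfdStripMn name
  match pvBisect name 32 0 pvSortedAliases.length with
  | some canonical => canonical
  | none => name

-- ===== PRECONDITION & SPEC =====
def Spec_normalize_name_component_py (name : String) (out : String) : Prop := out = normalize_name_component_py_alt name
instance (name : String) (out : String) : Decidable (Spec_normalize_name_component_py name out) := by unfold Spec_normalize_name_component_py; infer_instance

-- ===== CLAIM (what is proved, stated in full; the proofs are below) =====
def Claim_equal_normalize_name_component_py : Prop := ∀ (name : String), Dom_normalize_name_component_py name → Spec_normalize_name_component_py name (normalize_name_component_py name)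

-- ===== LEMMAS AND PROOFS =====

-- the 25 keys of the index
def pvKeys : List String := pvSortedAliases.map Prod.fst

-- if the name matches no key of any entry of A's table, A's scan falls through
theorem pvScanA_miss (name : String) (l : List (String × List String))
    (h : ∀ e ∈ l, name ∉ e.2 ∧ name ≠ e.1) : pvScanA name l = name := by
  induction l with
  | nil => rfl
  | cons e rest ih =>
    obtain ⟨h1, h2⟩ := h e (List.mem_cons_self ..)
    cases e with
    | mk c vs =>
      simp only [pvScanA]
      rw [if_neg, if_neg]
      · exact ih fun e he => h e (List.mem_cons_of_mem _ he)
      · simpa using h2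
      · simpa using h1

-- if the name matches no key of the sorted index, the binary search misses
theorem pvBisect_miss (name : String) (h : ∀ p ∈ pvSortedAliases, p.1 ≠ name) :
    ∀ fuel lo hi, hi ≤ pvSortedAliases.length → pvBisect name fuel lo hi = none := by
  intro fuel
  induction fuel with
  | zero => intro lo hi _; rfl
  | succ n ih =>
    intro lo hi hle
    simp only [pvBisect]
    split
    · next hlt =>
      have hmid : (lo + hi) / 2 < pvSortedAliases.length := by omega
      have hmem : pvSortedAliases.getD ((lo + hi) / 2) ("", "") ∈ pvSortedAliases := by
        rw [List.getD_eq_getElem?_getD, List.getElem?_eq_getElem hmid]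
        exact List.getElem_mem _
      have hne := h _ hmem
      rw [if_neg (by simpa using hne)]
      split
      · exact ih _ _ hle
      · exact ih _ _ (by omega)
    · rfl

-- ===== VERDICT (by name: the statement is the Claim_ definition above) =====
theorem normalize_name_component_py_spec : Claim_equal_normalize_name_component_py := by
  intro name _
  unfold Spec_normalize_name_component_py
  by_cases hmem : name ∈ pvKeys
  · -- name is one of the 25 concrete keys: both sides evaluate
    simp only [pvKeys, pvSortedAliases, List.map, List.mem_cons, List.not_mem_nil, or_false] at hmem
    rcases hmem with h|h|h|h|h|h|h|h|h|h|h|h|h|h|h|h|h|h|h|h|h|h|h|h|h <;> subst h <;> decide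
  · -- name matches no key: A's scan falls through and the binary search misses
    have hkeys : ∀ p ∈ pvSortedAliases, p.1 ≠ name := by
      intro p hp heq
      exact hmem (heq ▸ List.mem_map_of_mem hp)
    have hb := pvBisect_miss name hkeys 32 0 pvSortedAliases.length (le_refl _)
    have hne : ∀ e ∈ pvNameVariations, name ∉ e.2 ∧ name ≠ e.1 := by
      simp only [pvKeys, pvSortedAliases, List.map, List.mem_cons, List.not_mem_nil, or_false,
        not_or] at hmem
      intro e he
      simp only [pvNameVariations, List.mem_cons, List.not_mem_nil, or_false] at he
      rcases he with h|h|h|h|h|h|h|h|h <;> subst h <;>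
        simp_all [List.mem_cons, eq_comm]
    simp only [normalize_name_component_py, normalize_name_component_py_alt, pvNfdStripMn, hb,
      pvScanA_miss name _ hne]
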